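-- pv_equiv track=rewrite | github.com/devangpanchalpro/support-chatbot | bot/chatbot.py | get_main_category
-- ===== SOURCE A (Python) =====
-- def get_main_category(intents):
--     """Extract main category from intents"""
--     for intent in intents:
--         if intent.startswith("abha"):
--             return "abha"
--         elif intent.startswith("ayushman"):
--             return "ayushman"
--         elif intent.startswith("covid"):
--             return "covid"
--         elif intent.startswith("app"):
--             return "aarogyaone"
--     return None
-- ===== SOURCE B (Python) =====
-- TABLE = [
--     ("abha", "abha"),
--     ("ayushman", "ayushman"),
--     ("covid", "covid"),
--     ("app", "aarogyaone"),
-- ]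
--
-- def _first_idx(intents, prefix):
--     i = 0
--     for intent in intents:
--         if intent.startswith(prefix):
--             return i
--         i += 1
--     return None
--
-- def get_main_category(intents):
--     """Extract main category from intents"""
--     # One pass per prefix: first matching index of each, then the
--     # lexicographically smallest (index, priority) wins.
--     best = None  # (first matching index, priority, category)
--     for priority, (prefix, category) in enumerate(TABLE):
--         i = _first_idx(intents, prefix)
--         if i is not None:
--             if best is None or (i, priority) < (best[0], best[1]):
--                 best = (i, priority, category)
--     return best[2] if best is not None else None
-- ===== Notes on version B (the rewrite author's own statement) =====
-- stated objective: alternative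
-- what changed: Inverted the traversal: instead of scanning intents and short-circuiting through an elif prefix chain, B makes one pass per prefix computing each prefix's first matching index and then returns the category of the lexicographically minimal (index, priority) pair.
import Mathlib
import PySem

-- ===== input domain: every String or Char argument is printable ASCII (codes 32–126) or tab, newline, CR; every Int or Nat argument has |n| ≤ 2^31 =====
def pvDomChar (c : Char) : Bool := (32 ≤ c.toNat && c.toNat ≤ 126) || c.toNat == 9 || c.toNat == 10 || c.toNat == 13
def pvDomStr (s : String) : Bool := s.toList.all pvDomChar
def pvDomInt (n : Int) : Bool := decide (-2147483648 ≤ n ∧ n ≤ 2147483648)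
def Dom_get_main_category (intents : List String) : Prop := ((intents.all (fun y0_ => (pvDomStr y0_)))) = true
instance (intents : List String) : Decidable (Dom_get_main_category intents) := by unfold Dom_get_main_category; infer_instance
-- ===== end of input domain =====

-- B inverts the traversal: one pass per prefix computing the first matching index, then the lex-min (index, priority) wins; alternative decomposition, same cost.


-- ===== PORT A =====
def get_main_category (intents : List String) : Option String :=
  match intents with
  | [] => none
  | intent :: rest =>
    if PySem.Str.startswith intent "abha" then some "abha"
    else if PySem.Str.startswith intent "ayushman" then some "ayushman"
    else if PySem.Str.startswith intent "covid" then some "covid"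
    else if PySem.Str.startswith intent "app" then some "aarogyaone"
    else get_main_category rest

-- ===== PORT B =====
def pvTable : List (String × String) :=
  [("abha", "abha"), ("ayushman", "ayushman"), ("covid", "covid"), ("app", "aarogyaone")]

-- _first_idx: counter loop over intents, returns the index of the first startswith match
def pvFirstIdx (intents : List String) (prefix_ : String) (i : Int) : Option Int :=
  match intents with
  | [] => none
  | intent :: rest =>
    if PySem.Str.startswith intent prefix_ then some i
    else pvFirstIdx rest prefix_ (i + 1)

-- one iteration of B's loop body over the enumerated table
def pvStep (f : Option Int) (priority : Int) (category : String)
    (best : Option (Int × Int × String)) : Option (Int × Int × String) :=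
  match f with
  | none => best
  | some i =>
    match best with
    | none => some (i, priority, category)
    | some b =>
      if i < b.1 ∨ (i = b.1 ∧ priority < b.2.1) then some (i, priority, category) else best

def get_main_category_alt (intents : List String) : Option String :=
  ((PySem.List.enumerate pvTable).foldl
      (fun best e => pvStep (pvFirstIdx intents e.2.1 0) e.1 e.2.2 best) none).map
    (fun b => b.2.2)

-- ===== PRECONDITION & SPEC =====
def Spec_get_main_category (intents : List String) (out : Option String) : Prop := out = get_main_category_alt intents
instance (intents : List String) (out : Option String) : Decidable (Spec_get_main_category intents out) := by unfold Spec_get_main_category; infer_instance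

-- ===== CLAIM (what is proved, stated in full; the proofs are below) =====
def Claim_equal_get_main_category : Prop := ∀ (intents : List String), Dom_get_main_category intents → Spec_get_main_category intents (get_main_category intents)

-- ===== LEMMAS AND PROOFS =====

-- B's fold over the concrete 4-entry table, written out as a chain
lemma alt_chain (intents : List String) :
    get_main_category_alt intents =
      (pvStep (pvFirstIdx intents "app" 0) 3 "aarogyaone"
        (pvStep (pvFirstIdx intents "covid" 0) 2 "covid"
          (pvStep (pvFirstIdx intents "ayushman" 0) 1 "ayushman"
            (pvStep (pvFirstIdx intents "abha" 0) 0 "abha" none)))).map (fun b => b.2.2) := by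
  simp [get_main_category_alt, pvTable, PySem.List.enumerate]

lemma firstIdx_shift (xs : List String) (p : String) (i : Int) :
    pvFirstIdx xs p i = (pvFirstIdx xs p 0).map (· + i) := by
  induction xs generalizing i with
  | nil => rfl
  | cons x rest ih =>
    simp only [pvFirstIdx]
    by_cases h : PySem.Str.startswith x p
    · rw [if_pos h, if_pos h]; simp
    · rw [if_neg h, if_neg h, ih (i + 1), ih (0 + 1)]
      cases pvFirstIdx rest p 0 <;> simp <;> ring

lemma firstIdx_cons (x : String) (rest : List String) (p : String) :
    pvFirstIdx (x :: rest) p 0 =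
      if PySem.Str.startswith x p then some 0
      else (pvFirstIdx rest p 0).map (· + 1) := by
  simp only [pvFirstIdx]
  by_cases h : PySem.Str.startswith x p
  · rw [if_pos h, if_pos h]
  · rw [if_neg h, if_neg h]; exact firstIdx_shift rest p 1

lemma firstIdx_nonneg (xs : List String) (p : String) (i j : Int) (hi : 0 ≤ i)
    (h : pvFirstIdx xs p i = some j) : 0 ≤ j := by
  induction xs generalizing i with
  | nil => simp [pvFirstIdx] at h
  | cons x rest ih =>
    simp only [pvFirstIdx] at h
    by_cases hs : PySem.Str.startswith x p
    · rw [if_pos hs] at h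
      injection h with h
      omega
    · rw [if_neg hs] at h
      exact ih (i + 1) (by omega) h

-- a best with index 0 and smaller priority is never replaced
lemma step_keep0 (f : Option Int) (pri p0 : Int) (cat c : String)
    (hf : ∀ j, f = some j → 0 ≤ j) (h : p0 < pri) :
    pvStep f pri cat (some (0, p0, c)) = some (0, p0, c) := by
  cases f with
  | none => rfl
  | some i =>
    have := hf i rfl
    simp only [pvStep]
    rw [if_neg]
    omega

-- an index-0 match always replaces a best whose index is positive (or none)
lemma step_take0 (pri : Int) (cat : String) (best : Option (Int × Int × String))
    (hb : ∀ b, best = some b → 0 < b.1) :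
    pvStep (some 0) pri cat best = some (0, pri, cat) := by
  cases best with
  | none => rfl
  | some b =>
    have := hb b rfl
    simp only [pvStep]
    rw [if_pos]
    omega

-- stepping with a shifted first-index preserves "best is none or has positive index"
lemma step_pos (f : Option Int) (pri : Int) (cat : String) (best : Option (Int × Int × String))
    (hf : ∀ j, f = some j → 0 < j) (hb : ∀ b, best = some b → 0 < b.1) :
    ∀ b', pvStep f pri cat best = some b' → 0 < b'.1 := by
  intro b' h
  cases f with
  | none => exact hb b' h
  | some i =>
    have hi := hf i rfl
    cases best with
    | none =>
      simp only [pvStep] at h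
      injection h with h
      subst h
      exact hi
    | some b =>
      simp only [pvStep] at h
      split_ifs at h
      · injection h with h
        subst h
        exact hi
      · exact hb b' h

def pvShift (b : Int × Int × String) : Int × Int × String := (b.1 + 1, b.2)

lemma step_shift (g : Option Int) (pri : Int) (cat : String)
    (best : Option (Int × Int × String)) :
    pvStep (g.map (· + 1)) pri cat (best.map pvShift) =
      (pvStep g pri cat best).map pvShift := by
  cases g with
  | none => rfl
  | some i =>
    cases best with
    | none => rfl
    | some b =>
      simp only [Option.map_some, pvStep, pvShift]
      by_cases h : i < b.1 ∨ (i = b.1 ∧ pri < b.2.1)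
      · rw [if_pos (by omega), if_pos h]
        simp [pvShift]
      · rw [if_neg (by omega), if_neg h]
        simp [pvShift]

lemma eq_all (intents : List String) :
    get_main_category intents = get_main_category_alt intents := by
  induction intents with
  | nil => rfl
  | cons x rest ih =>
    have hab := firstIdx_cons x rest "abha"
    have hay := firstIdx_cons x rest "ayushman"
    have hco := firstIdx_cons x rest "covid"
    have happ := firstIdx_cons x rest "app"
    have nn : ∀ p j, pvFirstIdx (x :: rest) p 0 = some j → 0 ≤ j :=
      fun p j h => firstIdx_nonneg _ p 0 j le_rfl h
    rw [alt_chain]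
    by_cases h1 : PySem.Str.startswith x "abha"
    · rw [hab, if_pos h1, step_take0 _ _ _ (by intro b hb; simp at hb),
        step_keep0 _ _ _ _ _ (nn "ayushman") (by norm_num),
        step_keep0 _ _ _ _ _ (nn "covid") (by norm_num),
        step_keep0 _ _ _ _ _ (nn "app") (by norm_num)]
      simp only [get_main_category]
      rw [if_pos h1]
      rfl
    · have shiftf : ∀ p j, (pvFirstIdx rest p 0).map (· + 1) = some j → 0 < j := by
        intro p j h
        rcases Option.map_eq_some_iff.mp h with ⟨k, hk, rfl⟩
        have := firstIdx_nonneg rest p 0 k le_rfl hk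
        omega
      have pos1 := step_pos ((pvFirstIdx rest "abha" 0).map (· + 1)) 0 "abha" none
        (shiftf "abha") (by intro b hb; simp at hb)
      by_cases h2 : PySem.Str.startswith x "ayushman"
      · rw [hab, if_neg h1, hay, if_pos h2, step_take0 _ _ _ pos1,
          step_keep0 _ _ _ _ _ (nn "covid") (by norm_num),
          step_keep0 _ _ _ _ _ (nn "app") (by norm_num)]
        simp only [get_main_category]
        rw [if_neg h1, if_pos h2]
        rfl
      · have pos2 := step_pos ((pvFirstIdx rest "ayushman" 0).map (· + 1)) 1 "ayushman" _
          (shiftf "ayushman") pos1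
        by_cases h3 : PySem.Str.startswith x "covid"
        · rw [hab, if_neg h1, hay, if_neg h2, hco, if_pos h3, step_take0 _ _ _ pos2,
            step_keep0 _ _ _ _ _ (nn "app") (by norm_num)]
          simp only [get_main_category]
          rw [if_neg h1, if_neg h2, if_pos h3]
          rfl
        · have pos3 := step_pos ((pvFirstIdx rest "covid" 0).map (· + 1)) 2 "covid" _
            (shiftf "covid") pos2
          by_cases h4 : PySem.Str.startswith x "app"
          · rw [hab, if_neg h1, hay, if_neg h2, hco, if_neg h3, happ, if_pos h4,
              step_take0 _ _ _ pos3]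
            simp only [get_main_category]
            rw [if_neg h1, if_neg h2, if_neg h3, if_pos h4]
            rfl
          · rw [hab, if_neg h1, hay, if_neg h2, hco, if_neg h3, happ, if_neg h4]
            have : (none : Option (Int × Int × String)) = Option.map pvShift none := rfl
            rw [this, step_shift, step_shift, step_shift, step_shift]
            simp only [get_main_category]
            rw [if_neg h1, if_neg h2, if_neg h3, if_neg h4, ih, alt_chain]
            cases pvStep (pvFirstIdx rest "app" 0) 3 "aarogyaone"
              (pvStep (pvFirstIdx rest "covid" 0) 2 "covid"
                (pvStep (pvFirstIdx rest "ayushman" 0) 1 "ayushman"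
                  (pvStep (pvFirstIdx rest "abha" 0) 0 "abha" none))) <;> simp [pvShift]

-- ===== VERDICT (by name: the statement is the Claim_ definition above) =====
theorem get_main_category_spec : Claim_equal_get_main_category := by
  intro intents _
  exact eq_all intents
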